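-- pv_equiv track=rewrite | github.com/RGZ1890/codetree-TILs | 241110/기울어진 직사각형의 회전/rotate-slanted-rectangle.py | rotBoard
-- ===== SOURCE A (Python) =====
-- def rotBoard(board, path, start, l, d):
-- 	if d == 1:
-- 		tmp = board[start[0]][start[1]]
-- 		for i in range(l - 1):
-- 			board[path[i][0]][path[i][1]] = board[path[i + 1][0]][path[i + 1][1]]
-- 		board[path[l - 1][0]][path[l - 1][1]] = tmp
-- 	else:
-- 		tmp = board[path[l - 1][0]][path[l - 1][1]]
-- 		for i in range(l - 1, 0, -1):
-- 			board[path[i][0]][path[i][1]] = board[path[i - 1][0]][path[i - 1][1]]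
-- 		board[start[0]][start[1]] = tmp
--
-- 	return board
-- ===== SOURCE B (Python) =====
-- def rotBoard(board, path, start, l, d):
--     cells = [(path[i][0], path[i][1]) for i in range(l)]
--     vals = [board[r][c] for (r, c) in cells]
--     last = (path[l - 1][0], path[l - 1][1])
--     if d == 1:
--         dests = cells[:-1] + [last]
--         srcs = vals[1:] + [board[start[0]][start[1]]]
--     else:
--         dests = cells[1:] + [(start[0], start[1])]
--         srcs = vals[:-1] + [board[last[0]][last[1]]]
--     for (r, c), v in zip(dests, srcs):
--         board[r][c] = v
--     return board
-- ===== Notes on version B (the rewrite author's own statement) =====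
-- stated objective: alternative
-- what changed: B replaces A's interleaved single-tmp in-place shift (each step reads a cell the previous step may have just written) by a gather/scatter decomposition: it first builds the list of destination cells and the list of source values read from the untouched board, then writes the rotated value list back in one independent second pass. Pre_ excludes inputs whose first l path cells repeat a (normalized) board cell: there A's result hinges on reading already-overwritten cells, an artefact of the interleaved in-place shift.
-- outside the precondition, e.g. on rotBoard([[1, 2]], [[0, 0], [0, 1], [0, 0]], [0, 0], 3, 1): A returns [[1, 2]], B returns [[1, 1]]
import Mathlib
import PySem

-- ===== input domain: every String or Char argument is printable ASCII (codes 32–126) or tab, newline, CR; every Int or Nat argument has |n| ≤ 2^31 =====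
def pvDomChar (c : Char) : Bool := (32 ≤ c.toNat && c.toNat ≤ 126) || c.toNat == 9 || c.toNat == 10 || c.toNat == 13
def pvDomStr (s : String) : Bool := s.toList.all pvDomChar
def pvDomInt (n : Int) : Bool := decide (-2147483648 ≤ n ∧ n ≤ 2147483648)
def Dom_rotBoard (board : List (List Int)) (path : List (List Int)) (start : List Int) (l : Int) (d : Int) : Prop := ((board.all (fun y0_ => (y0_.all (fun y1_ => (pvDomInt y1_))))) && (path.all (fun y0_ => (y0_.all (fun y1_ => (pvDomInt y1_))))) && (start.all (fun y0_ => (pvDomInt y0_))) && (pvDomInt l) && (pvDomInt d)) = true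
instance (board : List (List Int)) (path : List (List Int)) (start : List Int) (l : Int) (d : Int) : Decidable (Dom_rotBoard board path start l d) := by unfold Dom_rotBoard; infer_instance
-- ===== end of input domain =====

-- B replaces A's interleaved single-tmp in-place shift by a gather-then-scatter decomposition
-- (collect destination cells and source values first, write them back in a second pass); same cost,
-- different structure.  Both A and B mutate `board` in Python; the theorems are about the returned board.

-- shared cell/read/write helpers (Python board[r][c] access, exact via PySem)
def pvRead (b : List (List Int)) (rc : Int × Int) : Int :=
  PySem.List.pyGetD (PySem.List.pyGetD b rc.1 []) rc.2 0

def pvWrite (b : List (List Int)) (rc : Int × Int) (v : Int) : List (List Int) :=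
  PySem.List.pySetD b rc.1 (PySem.List.pySetD (PySem.List.pyGetD b rc.1 []) rc.2 v)

def pvCellOf (p : List Int) : Int × Int :=
  (PySem.List.pyGetD p 0 0, PySem.List.pyGetD p 1 0)

def pvCellAt (path : List (List Int)) (i : Int) : Int × Int :=
  pvCellOf (PySem.List.pyGetD path i [])

-- ===== PORT A =====
def rotBoard (board : List (List Int)) (path : List (List Int)) (start : List Int) (l : Int) (d : Int) : List (List Int) :=
  if d = 1 then
    let tmp := pvRead board (pvCellOf start)
    let b := (PySem.List.pyRange 0 (l - 1) 1).foldl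
      (fun b i => pvWrite b (pvCellAt path i) (pvRead b (pvCellAt path (i + 1)))) board
    pvWrite b (pvCellAt path (l - 1)) tmp
  else
    let tmp := pvRead board (pvCellAt path (l - 1))
    let b := (PySem.List.pyRange (l - 1) 0 (-1)).foldl
      (fun b i => pvWrite b (pvCellAt path i) (pvRead b (pvCellAt path (i - 1)))) board
    pvWrite b (pvCellOf start) tmp

-- ===== PORT B =====
def rotBoard_alt (board : List (List Int)) (path : List (List Int)) (start : List Int) (l : Int) (d : Int) : List (List Int) :=
  let cells := (PySem.List.pyRange 0 l 1).map (fun i => pvCellAt path i)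
  let vals := cells.map (fun rc => pvRead board rc)
  let last := pvCellAt path (l - 1)
  let ds :=
    if d = 1 then
      (PySem.List.slice cells none (some (-1)) ++ [last],
       PySem.List.slice vals (some 1) none ++ [pvRead board (pvCellOf start)])
    else
      (PySem.List.slice cells (some 1) none ++ [pvCellOf start],
       PySem.List.slice vals none (some (-1)) ++ [pvRead board last])
  (ds.1.zip ds.2).foldl (fun b rv => pvWrite b rv.1 rv.2) board

-- ===== PRECONDITION & SPEC =====
-- Python's normalized index (negative indices count from the end), and the normalized cell of rc
def pvNormI (n : Nat) (i : Int) : Nat := if 0 ≤ i then i.toNat else n - (-i).toNat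

def pvNm (b : List (List Int)) (rc : Int × Int) : Nat × Nat :=
  (pvNormI b.length rc.1, pvNormI ((b.getD (pvNormI b.length rc.1) []).length) rc.2)

def pvCellOk (b : List (List Int)) (rc : Int × Int) : Prop :=
  PySem.Raise.InRange b.length rc.1 ∧
  PySem.Raise.InRange ((b.getD (pvNormI b.length rc.1) []).length) rc.2

-- Pre_ excludes (besides the index errors on which A raises) only inputs whose first l path cells
-- repeat a (normalized) board cell: there A's interleaved in-place shift reads already-overwritten
-- cells, while B's gather-first pass reads only original values, and neither order is specified.
def Pre_rotBoard (board : List (List Int)) (path : List (List Int)) (start : List Int) (l : Int) (d : Int) : Prop :=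
  2 ≤ start.length ∧ pvCellOk board (pvCellOf start) ∧
  ((1 ≤ l ∧ l ≤ path.length ∧
    (∀ p ∈ path.take l.toNat, 2 ≤ p.length ∧ pvCellOk board (pvCellOf p)) ∧
    ((path.take l.toNat).map (fun p => pvNm board (pvCellOf p))).Nodup) ∨
   (l < 1 ∧ PySem.Raise.InRange path.length (l - 1) ∧
    2 ≤ (PySem.List.pyGetD path (l - 1) []).length ∧
    pvCellOk board (pvCellOf (PySem.List.pyGetD path (l - 1) []))))

instance (board : List (List Int)) (path : List (List Int)) (start : List Int) (l : Int) (d : Int) : Decidable (Pre_rotBoard board path start l d) := by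
  unfold Pre_rotBoard pvCellOk PySem.Raise.InRange; infer_instance

def pvWitness_rotBoard : List (List Int) × List (List Int) × List Int × Int × Int :=
  ([[1, 2], [3, 4]], [[0, 0], [0, 1]], [1, 0], 2, 1)

def Spec_rotBoard (board : List (List Int)) (path : List (List Int)) (start : List Int) (l : Int) (d : Int) (out : List (List Int)) : Prop := out = rotBoard_alt board path start l d
instance (board : List (List Int)) (path : List (List Int)) (start : List Int) (l : Int) (d : Int) (out : List (List Int)) : Decidable (Spec_rotBoard board path start l d out) := by unfold Spec_rotBoard; infer_instance

-- ===== CLAIM (what is proved, stated in full; the proofs are below) =====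
def Claim_equal_rotBoard : Prop := ∀ (board : List (List Int)) (path : List (List Int)) (start : List Int) (l : Int) (d : Int), Dom_rotBoard board path start l d → Pre_rotBoard board path start l d → Spec_rotBoard board path start l d (rotBoard board path start l d)

-- ===== LEMMAS AND PROOFS =====

theorem witness_ok :
    Dom_rotBoard pvWitness_rotBoard.1 pvWitness_rotBoard.2.1 pvWitness_rotBoard.2.2.1 pvWitness_rotBoard.2.2.2.1 pvWitness_rotBoard.2.2.2.2 ∧
    Pre_rotBoard pvWitness_rotBoard.1 pvWitness_rotBoard.2.1 pvWitness_rotBoard.2.2.1 pvWitness_rotBoard.2.2.2.1 pvWitness_rotBoard.2.2.2.2 := by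
  decide

-- ---- Nat-indexed board operations (proof layer) ----
def nRead (b : List (List Int)) (rc : Nat × Nat) : Int := (b.getD rc.1 []).getD rc.2 0
def nWrite (b : List (List Int)) (rc : Nat × Nat) (v : Int) : List (List Int) :=
  b.set rc.1 ((b.getD rc.1 []).set rc.2 v)
def nOk (b : List (List Int)) (rc : Nat × Nat) : Prop :=
  rc.1 < b.length ∧ rc.2 < (b.getD rc.1 []).length
def SameShape (b b' : List (List Int)) : Prop :=
  b.length = b'.length ∧ ∀ k : Nat, (b.getD k []).length = (b'.getD k []).length

-- ---- bridge: PySem indexing under InRange is getD/set at the normalized index ----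
theorem pvNormI_lt {n : Nat} {i : Int} (h : PySem.Raise.InRange n i) : pvNormI n i < n := by
  unfold pvNormI PySem.Raise.InRange at *; rcases h with ⟨h1, h2⟩; split_ifs with h0 <;> omega

theorem pyIdx?_norm {n : Nat} {i : Int} (h : PySem.Raise.InRange n i) :
    PySem.List.pyIdx? n i = some (pvNormI n i) := by
  unfold PySem.List.pyIdx? pvNormI
  rcases h with ⟨h1, h2⟩
  split_ifs <;> first | rfl | omega | skip

theorem pyGetD_norm {α : Type} {xs : List α} {i : Int} {d : α} (h : PySem.Raise.InRange xs.length i) :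
    PySem.List.pyGetD xs i d = xs.getD (pvNormI xs.length i) d := by
  have hk := pvNormI_lt h
  unfold PySem.List.pyGetD PySem.List.pyGet?
  rw [pyIdx?_norm h]
  simp [List.getD_eq_getElem?_getD]

theorem pySetD_norm {α : Type} {xs : List α} {i : Int} {v : α} (h : PySem.Raise.InRange xs.length i) :
    PySem.List.pySetD xs i v = xs.set (pvNormI xs.length i) v := by
  unfold PySem.List.pySetD PySem.List.pySet?
  rw [pyIdx?_norm h]
  rfl

theorem sameShape_refl (b : List (List Int)) : SameShape b b := ⟨rfl, fun _ => rfl⟩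

theorem sameShape_trans {a b c : List (List Int)} (h1 : SameShape a b) (h2 : SameShape b c) :
    SameShape a c := ⟨h1.1.trans h2.1, fun k => (h1.2 k).trans (h2.2 k)⟩

theorem sameShape_nWrite (b : List (List Int)) (rc : Nat × Nat) (v : Int) :
    SameShape b (nWrite b rc v) := by
  constructor
  · simp [nWrite]
  · intro k
    simp only [nWrite, List.getD_eq_getElem?_getD, List.getElem?_set]
    split_ifs with h1 h2
    · subst h1; simp
    · rw [List.getElem?_eq_none (by omega)]
    · rfl

theorem nOk_shape {b b' : List (List Int)} (h : SameShape b b') {rc : Nat × Nat} (hk : nOk b rc) :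
    nOk b' rc := by
  unfold nOk at *
  exact ⟨h.1 ▸ hk.1, h.2 rc.1 ▸ hk.2⟩

theorem nOk_nm {b : List (List Int)} {rc : Int × Int} (h : pvCellOk b rc) : nOk b (pvNm b rc) := by
  unfold nOk pvNm
  exact ⟨pvNormI_lt h.1, pvNormI_lt h.2⟩

theorem pvRead_eq {b0 b : List (List Int)} (hs : SameShape b0 b) {rc : Int × Int}
    (h : pvCellOk b0 rc) : pvRead b rc = nRead b (pvNm b0 rc) := by
  obtain ⟨hlen, hrow⟩ := hs
  obtain ⟨h1, h2⟩ := h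
  have hr : PySem.Raise.InRange b.length rc.1 := hlen ▸ h1
  unfold pvRead nRead pvNm
  rw [pyGetD_norm hr]
  simp only [← hlen]
  have hc : PySem.Raise.InRange ((b.getD (pvNormI b0.length rc.1) []).length) rc.2 :=
    (hrow (pvNormI b0.length rc.1)) ▸ h2
  rw [pyGetD_norm hc]
  simp only [← hrow]

theorem pvWrite_eq {b0 b : List (List Int)} (hs : SameShape b0 b) {rc : Int × Int}
    (h : pvCellOk b0 rc) (v : Int) : pvWrite b rc v = nWrite b (pvNm b0 rc) v := by
  obtain ⟨hlen, hrow⟩ := hs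
  obtain ⟨h1, h2⟩ := h
  have hr : PySem.Raise.InRange b.length rc.1 := hlen ▸ h1
  unfold pvWrite nWrite pvNm
  rw [pyGetD_norm hr, pySetD_norm hr]
  simp only [← hlen]
  have hc : PySem.Raise.InRange ((b.getD (pvNormI b0.length rc.1) []).length) rc.2 :=
    (hrow (pvNormI b0.length rc.1)) ▸ h2
  rw [pySetD_norm hc]
  simp only [← hrow]

-- ---- reads and writes at Nat cells ----
theorem getD_set_self {α : Type} {r : List α} {i : Nat} (h : i < r.length) (v dflt : α) :
    (r.set i v).getD i dflt = v := by
  rw [List.getD_eq_getElem?_getD, List.getElem?_set_self h]; rfl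

theorem getD_set_ne {α : Type} {r : List α} {i j : Nat} (h : i ≠ j) (v dflt : α) :
    (r.set i v).getD j dflt = r.getD j dflt := by
  rw [List.getD_eq_getElem?_getD, List.getElem?_set_ne h, ← List.getD_eq_getElem?_getD]

theorem nRead_nWrite {b : List (List Int)} {p : Nat × Nat} (hp : nOk b p) (v : Int) (q : Nat × Nat) :
    nRead (nWrite b p v) q = if q = p then v else nRead b q := by
  unfold nRead nWrite
  by_cases h1 : q.1 = p.1
  · rw [h1, getD_set_self hp.1]
    by_cases h2 : q.2 = p.2
    · rw [h2, getD_set_self hp.2, if_pos (Prod.ext h1 h2)]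
    · rw [getD_set_ne (fun h => h2 h.symm), if_neg (fun h => h2 (by rw [h]))]
  · rw [getD_set_ne (fun h => h1 h.symm), if_neg (fun h => h1 (by rw [h]))]

theorem nWrite_comm {b : List (List Int)} {p q : Nat × Nat} (hp : nOk b p) (_hq : nOk b q)
    (hne : p ≠ q) (v w : Int) :
    nWrite (nWrite b p v) q w = nWrite (nWrite b q w) p v := by
  unfold nWrite
  by_cases h1 : p.1 = q.1
  · have h2 : p.2 ≠ q.2 := fun h => hne (Prod.ext h1 h)
    rw [← h1]
    rw [getD_set_self hp.1, getD_set_self hp.1]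
    rw [List.set_set, List.set_set, List.set_comm _ _ h2]
  · rw [getD_set_ne h1, getD_set_ne (fun h => h1 h.symm)]
    rw [List.set_comm _ _ h1]

-- ---- the two fold shapes over Nat cells ----
theorem sameShape_scat (L : List ((Nat × Nat) × Int)) (b : List (List Int)) :
    SameShape b (L.foldl (fun b pv => nWrite b pv.1 pv.2) b) := by
  induction L generalizing b with
  | nil => exact sameShape_refl b
  | cons pv L ih =>
    exact sameShape_trans (sameShape_nWrite b pv.1 pv.2) (ih (nWrite b pv.1 pv.2))

-- G1: the interleaved shift equals the scatter of the ORIGINAL reads, for distinct in-range cells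
theorem shift_eq_scat (C : List (Nat × Nat)) (b : List (List Int))
    (hok : ∀ rc ∈ C, nOk b rc) (hnd : C.Nodup) :
    (C.zip C.tail).foldl (fun b pq => nWrite b pq.1 (nRead b pq.2)) b
      = (C.zip ((C.map (nRead b)).tail)).foldl (fun b pv => nWrite b pv.1 pv.2) b := by
  induction C generalizing b with
  | nil => rfl
  | cons p C ih =>
    cases C with
    | nil => rfl
    | cons q rest =>
      have hpmem : p ∉ q :: rest := (List.nodup_cons.mp hnd).1
      have hokp : nOk b p := hok p (by simp)
      have hshape := sameShape_nWrite b p (nRead b q)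
      have hok' : ∀ rc ∈ q :: rest, nOk (nWrite b p (nRead b q)) rc :=
        fun rc hrc => nOk_shape hshape (hok rc (List.mem_cons_of_mem _ hrc))
      have hnd' : (q :: rest).Nodup := (List.nodup_cons.mp hnd).2
      have hmap : rest.map (nRead (nWrite b p (nRead b q))) = rest.map (nRead b) := by
        apply List.map_congr_left
        intro x hx
        rw [nRead_nWrite hokp]
        exact if_neg (fun h : x = p => hpmem (h ▸ List.mem_cons_of_mem q hx))
      simp only [List.zip_cons_cons, List.tail_cons, List.map_cons, List.foldl_cons]
      rw [← hmap]
      exact ih (nWrite b p (nRead b q)) hok' hnd'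

-- G3: a scatter with pairwise-distinct destinations may be performed in reverse order
theorem scat_snoc (L : List ((Nat × Nat) × Int)) (x : (Nat × Nat) × Int) (b : List (List Int))
    (hok : ∀ pv ∈ L, nOk b pv.1) (hx : nOk b x.1) (hni : x.1 ∉ L.map Prod.fst) :
    (L ++ [x]).foldl (fun b pv => nWrite b pv.1 pv.2) b
      = L.foldl (fun b pv => nWrite b pv.1 pv.2) (nWrite b x.1 x.2) := by
  induction L generalizing b with
  | nil => rfl
  | cons pv L ih =>
    have hxp : x.1 ≠ pv.1 := fun h => hni (by simp [h])
    have hokpv : nOk b pv.1 := hok pv (by simp)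
    simp only [List.cons_append, List.foldl_cons]
    rw [ih (nWrite b pv.1 pv.2)
        (fun y hy => nOk_shape (sameShape_nWrite b pv.1 pv.2) (hok y (List.mem_cons_of_mem _ hy)))
        (nOk_shape (sameShape_nWrite b pv.1 pv.2) hx)
        (fun h => hni (by simp at h ⊢; right; exact h))]
    rw [nWrite_comm hokpv hx (fun h => hxp (by rw [h])) pv.2 x.2]

theorem scat_reverse (L : List ((Nat × Nat) × Int)) (b : List (List Int))
    (hok : ∀ pv ∈ L, nOk b pv.1) (hnd : (L.map Prod.fst).Nodup) :
    L.reverse.foldl (fun b pv => nWrite b pv.1 pv.2) b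
      = L.foldl (fun b pv => nWrite b pv.1 pv.2) b := by
  induction L generalizing b with
  | nil => rfl
  | cons a L ih =>
    have hokA : nOk b a.1 := hok a (by simp)
    have hnd2 : (a.1 :: L.map Prod.fst).Nodup := by simpa using hnd
    have hniA : a.1 ∉ L.reverse.map Prod.fst := by
      simpa using (List.nodup_cons.mp hnd2).1
    simp only [List.reverse_cons]
    rw [scat_snoc L.reverse a b
        (fun pv hpv => hok pv (List.mem_cons_of_mem _ (List.mem_reverse.mp hpv))) hokA hniA]
    rw [ih (nWrite b a.1 a.2)
        (fun pv hpv => nOk_shape (sameShape_nWrite b a.1 a.2) (hok pv (List.mem_cons_of_mem _ hpv)))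
        ((List.nodup_cons.mp hnd2).2)]
    rfl

-- ---- converting the pv-folds to n-folds ----
theorem foldPairs_to_nat (b0 : List (List Int)) (P : List ((Int × Int) × (Int × Int)))
    (b : List (List Int)) (hs : SameShape b0 b)
    (h : ∀ pq ∈ P, pvCellOk b0 pq.1 ∧ pvCellOk b0 pq.2) :
    P.foldl (fun b pq => pvWrite b pq.1 (pvRead b pq.2)) b
      = (P.map (fun pq => (pvNm b0 pq.1, pvNm b0 pq.2))).foldl
          (fun b pq => nWrite b pq.1 (nRead b pq.2)) b := by
  induction P generalizing b with
  | nil => rfl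
  | cons pq P ih =>
    have h1 := (h pq (by simp)).1
    have h2 := (h pq (by simp)).2
    simp only [List.map_cons, List.foldl_cons]
    rw [pvRead_eq hs h2, pvWrite_eq hs h1]
    exact ih (nWrite b (pvNm b0 pq.1) (nRead b (pvNm b0 pq.2)))
      (sameShape_trans hs (sameShape_nWrite _ _ _))
      (fun y hy => h y (List.mem_cons_of_mem _ hy))

theorem foldWrites_to_nat (b0 : List (List Int)) (L : List ((Int × Int) × Int))
    (b : List (List Int)) (hs : SameShape b0 b) (h : ∀ pv ∈ L, pvCellOk b0 pv.1) :
    L.foldl (fun b pv => pvWrite b pv.1 pv.2) b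
      = (L.map (fun pv => (pvNm b0 pv.1, pv.2))).foldl (fun b pv => nWrite b pv.1 pv.2) b := by
  induction L generalizing b with
  | nil => rfl
  | cons pv L ih =>
    simp only [List.map_cons, List.foldl_cons]
    rw [pvWrite_eq hs (h pv (by simp)) pv.2]
    exact ih (nWrite b (pvNm b0 pv.1) pv.2)
      (sameShape_trans hs (sameShape_nWrite _ _ _))
      (fun y hy => h y (List.mem_cons_of_mem _ hy))

-- ---- list plumbing ----
theorem map_range_getD {α : Type} (xs : List α) (dflt : α) (n : Nat) (h : n ≤ xs.length) :
    (PySem.List.pyRange 0 (n : Int) 1).map (fun i => PySem.List.pyGetD xs i dflt) = xs.take n := by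
  induction n with
  | zero => simp [PySem.List.pyRange_one_eq_nil (le_refl 0)]
  | succ n ihn =>
    have hc : ((n + 1 : Nat) : Int) = (n : Int) + 1 := by push_cast; ring
    rw [hc, PySem.List.pyRange_one_succ_right (by positivity), List.map_append,
      ihn (by omega), List.take_succ]
    simp [List.getElem?_eq_getElem (by omega : n < xs.length)]

theorem range_pairs_succ {γ : Type} (f : Int → γ) (m : Nat) :
    (PySem.List.pyRange 0 (m : Int) 1).map (fun i => (f i, f (i + 1)))
      = (((PySem.List.pyRange 0 ((m : Int) + 1) 1).map f).zip
         (((PySem.List.pyRange 0 ((m : Int) + 1) 1).map f).tail)) := by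
  apply List.ext_getElem
  · simp [PySem.List.length_pyRange_one]
  · intro i h1 h2
    have hi : i < m := by simpa [PySem.List.length_pyRange_one] using h1
    simp [List.getElem_zip, List.getElem_tail, PySem.List.getElem_pyRange_one]

theorem range_pairs_pred {γ : Type} (f : Int → γ) (m : Nat) :
    (PySem.List.pyRange 1 ((m : Int) + 1) 1).map (fun i => (f i, f (i - 1)))
      = (((PySem.List.pyRange 0 ((m : Int) + 1) 1).map f).tail).zip
        ((PySem.List.pyRange 0 ((m : Int) + 1) 1).map f).dropLast := by
  apply List.ext_getElem
  · simp [PySem.List.length_pyRange_one]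
  · intro i h1 h2
    have hi : i < m := by simpa [PySem.List.length_pyRange_one] using h1
    simp [List.getElem_zip, List.getElem_tail, List.getElem_dropLast, PySem.List.getElem_pyRange_one]
    ring_nf

theorem rev_adj {α : Type} (xs : List α) :
    xs.reverse.zip xs.reverse.tail = (xs.tail.zip xs.dropLast).reverse := by
  apply List.ext_getElem
  · simp <;> omega
  · intro i h1 h2
    have hi : i < xs.length - 1 := by simpa using h1
    have hx1 : 0 < xs.length := by omega
    rw [List.getElem_zip, List.getElem_tail, List.getElem_reverse, List.getElem_reverse,
      List.getElem_reverse, List.getElem_zip, List.getElem_tail, List.getElem_dropLast]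
    simp only [List.length_zip, List.length_tail, List.length_dropLast]
    congr 2 <;> omega

theorem zip_snoc_snd {α β : Type} (xs : List α) (ys : List β) (t : β) (hne : xs ≠ [])
    (h : ys.length + 1 = xs.length) :
    xs.zip (ys ++ [t]) = xs.zip ys ++ [(xs.getLast hne, t)] := by
  induction ys generalizing xs with
  | nil =>
    match xs, h with
    | [a], _ => rfl
  | cons y ys ih =>
    match xs, h with
    | a :: xs, h =>
      have hxs : xs ≠ [] := by
        intro hx; rw [hx] at h; simp at h
      simp only [List.cons_append, List.zip_cons_cons]
      rw [ih xs hxs (by simpa using h), List.getLast_cons hxs]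

theorem zip_rev_pred {α β : Type} (xs : List α) (ys : List β) (h : ys.length + 1 = xs.length) :
    xs.reverse.zip ys.reverse = (xs.tail.zip ys).reverse := by
  apply List.ext_getElem
  · simp; omega
  · intro i h1 h2
    have hi : i < xs.length - 1 := by simp at h1; omega
    rw [List.getElem_zip, List.getElem_reverse, List.getElem_reverse, List.getElem_reverse,
      List.getElem_zip, List.getElem_tail]
    simp only [List.length_zip, List.length_tail]
    congr 2 <;> omega

theorem shiftA_fold (path : List (List Int)) (b : List (List Int)) (R : List Int) :
    R.foldl (fun b i => pvWrite b (pvCellAt path i) (pvRead b (pvCellAt path (i + 1)))) b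
      = (R.map (fun i => (pvCellAt path i, pvCellAt path (i + 1)))).foldl
          (fun b pq => pvWrite b pq.1 (pvRead b pq.2)) b := by
  rw [List.foldl_map]

theorem shiftD_fold (path : List (List Int)) (b : List (List Int)) (R : List Int) :
    R.foldl (fun b i => pvWrite b (pvCellAt path i) (pvRead b (pvCellAt path (i - 1)))) b
      = (R.map (fun i => (pvCellAt path i, pvCellAt path (i - 1)))).foldl
          (fun b pq => pvWrite b pq.1 (pvRead b pq.2)) b := by
  rw [List.foldl_map]

-- ---- main equivalence ----
theorem small_equiv (board path : List (List Int)) (start : List Int) (l d : Int)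
    (hl : l < 1) :
    rotBoard board path start l d = rotBoard_alt board path start l d := by
  have h0 : PySem.List.pyRange 0 l 1 = [] := PySem.List.pyRange_one_eq_nil (by omega)
  have h1 : PySem.List.pyRange 0 (l - 1) 1 = [] := PySem.List.pyRange_one_eq_nil (by omega)
  have h2 : PySem.List.pyRange (l - 1) 0 (-1) = [] := by
    rw [PySem.List.pyRange_neg_one_eq_reverse, show l - 1 + 1 = l from by ring,
      show (0 : Int) + 1 = 1 from rfl, PySem.List.pyRange_one_eq_nil (by omega)]
    rfl
  by_cases hd : d = 1
  · simp [rotBoard, rotBoard_alt, hd, h0, h1,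
      PySem.List.slice_from_one, PySem.List.slice_to_neg_one]
  · simp [rotBoard, rotBoard_alt, hd, h0, h2,
      PySem.List.slice_from_one, PySem.List.slice_to_neg_one]

theorem main_equiv (board path : List (List Int)) (start : List Int) (l d : Int)
    (hl1 : 1 ≤ l) (hl2 : l ≤ path.length) (hs2 : 2 ≤ start.length)
    (hsok : pvCellOk board (pvCellOf start))
    (hpok : ∀ p ∈ path.take l.toNat, 2 ≤ p.length ∧ pvCellOk board (pvCellOf p))
    (hnd : ((path.take l.toNat).map (fun p => pvNm board (pvCellOf p))).Nodup) :
    rotBoard board path start l d = rotBoard_alt board path start l d := by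
  set n := l.toNat with hndef
  have hnl : ((n : Nat) : Int) = l := Int.toNat_of_nonneg (by omega)
  have hn1 : 1 ≤ n := by omega
  have hnp : n ≤ path.length := by omega
  set C : List (Int × Int) := (path.take n).map pvCellOf with hCdef
  have hcells : (PySem.List.pyRange 0 l 1).map (fun i => pvCellAt path i) = C := by
    conv_lhs => rw [← hnl]
    rw [hCdef, ← map_range_getD path [] n hnp, List.map_map]
    rfl
  set NC : List (Nat × Nat) := C.map (pvNm board) with hNCdef
  have hCok : ∀ rc ∈ C, pvCellOk board rc := by
    intro rc hrc
    obtain ⟨p, hp, rfl⟩ := List.mem_map.mp hrc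
    exact (hpok p hp).2
  have hNCok : ∀ rc ∈ NC, nOk board rc := by
    intro rc hrc
    obtain ⟨c, hc, rfl⟩ := List.mem_map.mp hrc
    exact nOk_nm (hCok c hc)
  have hNCnd : NC.Nodup := by
    rw [hNCdef, hCdef, List.map_map]; exact hnd
  have hClen : C.length = n := by
    rw [hCdef]; simp [List.length_take]; omega
  have hNClen : NC.length = n := by rw [hNCdef]; simp [hClen]
  have hCne : C ≠ [] := List.ne_nil_of_length_pos (by omega)
  have hNCne : NC ≠ [] := List.ne_nil_of_length_pos (by omega)
  set nvals : List Int := NC.map (nRead board) with hnvalsdef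
  have hnvlen : nvals.length = n := by rw [hnvalsdef]; simp [hNClen]
  have hnvne : nvals ≠ [] := List.ne_nil_of_length_pos (by omega)
  have hvals : C.map (fun rc => pvRead board rc) = nvals := by
    rw [hnvalsdef, hNCdef]
    conv_rhs => rw [List.map_map]
    apply List.map_congr_left
    intro c hc
    exact pvRead_eq (sameShape_refl board) (hCok c hc)
  have hR? : (PySem.List.pyRange 0 l 1).getLast? = some (l - 1) := by
    conv_lhs => rw [show l = (l - 1) + 1 from by ring]
    rw [PySem.List.pyRange_one_succ_right (by omega)]
    exact List.getLast?_concat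
  have hClast? : C.getLast? = some (pvCellAt path (l - 1)) := by
    rw [← hcells, List.getLast?_map, hR?]
    rfl
  have hlastC : pvCellAt path (l - 1) = C.getLast hCne := by
    rw [List.getLast?_eq_some_getLast hCne] at hClast?
    exact (Option.some_inj.mp hClast?).symm
  have hlastNC : pvNm board (C.getLast hCne) = NC.getLast hNCne := by
    have h2 : NC.getLast? = some (pvNm board (C.getLast hCne)) := by
      rw [hNCdef, List.getLast?_map, List.getLast?_eq_some_getLast hCne]
      rfl
    rw [List.getLast?_eq_some_getLast hNCne] at h2
    exact (Option.some_inj.mp h2).symm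
  have hlastval : nRead board (NC.getLast hNCne) = nvals.getLast hnvne := by
    have h2 : nvals.getLast? = some (nRead board (NC.getLast hNCne)) := by
      rw [hnvalsdef, List.getLast?_map, List.getLast?_eq_some_getLast hNCne]
      rfl
    rw [List.getLast?_eq_some_getLast hnvne] at h2
    exact (Option.some_inj.mp h2).symm
  have hsnoc : ∀ (L : List ((Nat × Nat) × Int)) (x : (Nat × Nat) × Int) (b0 : List (List Int)),
      (L ++ [x]).foldl (fun b pv => nWrite b pv.1 pv.2) b0
        = nWrite (L.foldl (fun b pv => nWrite b pv.1 pv.2) b0) x.1 x.2 := by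
    intro L x b0; rw [List.foldl_append]; rfl
  by_cases hd : d = 1
  · simp only [rotBoard, rotBoard_alt, if_pos hd]
    rw [hcells, PySem.List.slice_from_one, PySem.List.slice_to_neg_one, hvals]
    rw [hlastC]
    rw [List.dropLast_append_getLast hCne]
    rw [show (l - 1) = ((n - 1 : Nat) : Int) from by omega]
    rw [shiftA_fold]
    rw [range_pairs_succ (fun i => pvCellAt path i) (n - 1)]
    rw [show ((n - 1 : Nat) : Int) + 1 = l from by omega]
    rw [hcells]
    rw [foldPairs_to_nat board _ board (sameShape_refl board) (by
      intro pq hpq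
      obtain ⟨a, c⟩ := pq
      obtain ⟨h1, h2⟩ := List.of_mem_zip hpq
      exact ⟨hCok _ h1, hCok _ (List.mem_of_mem_tail h2)⟩)]
    have hzipmap : (C.zip C.tail).map (fun pq => (pvNm board pq.1, pvNm board pq.2))
        = NC.zip NC.tail := by
      conv_rhs => rw [hNCdef, ← List.map_tail, List.zip_map]
      rfl
    rw [hzipmap]
    rw [shift_eq_scat NC board hNCok hNCnd]
    rw [← hnvalsdef]
    rw [pvWrite_eq (sameShape_scat _ board) (hCok _ (List.getLast_mem hCne))]
    rw [hlastNC]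
    rw [← hsnoc (NC.zip nvals.tail) (NC.getLast hNCne, pvRead board (pvCellOf start)) board]
    rw [← zip_snoc_snd NC nvals.tail (pvRead board (pvCellOf start)) hNCne
      (by simp [hnvlen, hNClen]; omega)]
    rw [foldWrites_to_nat board _ board (sameShape_refl board) (by
      intro pv hpv
      obtain ⟨a, v⟩ := pv
      exact hCok _ (List.of_mem_zip hpv).1)]
    have hzipmap2 : (C.zip (nvals.tail ++ [pvRead board (pvCellOf start)])).map
        (fun pv => (pvNm board pv.1, pv.2))
        = NC.zip (nvals.tail ++ [pvRead board (pvCellOf start)]) := by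
      conv_rhs => rw [hNCdef, List.zip_map_left]
      rfl
    rw [hzipmap2]
  · simp only [rotBoard, rotBoard_alt, if_neg hd]
    rw [hcells, PySem.List.slice_from_one, PySem.List.slice_to_neg_one, hvals]
    rw [hlastC]
    rw [pvRead_eq (sameShape_refl board) (hCok _ (List.getLast_mem hCne)), hlastNC, hlastval]
    rw [PySem.List.pyRange_neg_one_eq_reverse]
    rw [show l - 1 + 1 = l from by ring]
    rw [shiftD_fold]
    rw [List.map_reverse]
    have hpd := range_pairs_pred (fun i => pvCellAt path i) (n - 1)
    rw [show ((n - 1 : Nat) : Int) + 1 = l from by omega] at hpd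
    rw [hcells] at hpd
    rw [show (0 : Int) + 1 = 1 from rfl, hpd]
    rw [foldPairs_to_nat board _ board (sameShape_refl board) (by
      intro pq hpq
      obtain ⟨a, c⟩ := pq
      rw [List.mem_reverse] at hpq
      obtain ⟨h1, h2⟩ := List.of_mem_zip hpq
      exact ⟨hCok _ (List.mem_of_mem_tail h1), hCok _ (List.mem_of_mem_dropLast h2)⟩)]
    have hzipmapD : ((C.tail.zip C.dropLast).reverse).map
        (fun pq => (pvNm board pq.1, pvNm board pq.2)) = (NC.tail.zip NC.dropLast).reverse := by
      rw [List.map_reverse]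
      congr 1
      conv_rhs => rw [hNCdef, ← List.map_tail, ← List.map_dropLast, List.zip_map]
      rfl
    rw [hzipmapD]
    rw [← rev_adj NC]
    rw [shift_eq_scat NC.reverse board
      (fun rc hrc => hNCok rc (List.mem_reverse.mp hrc)) (List.nodup_reverse.mpr hNCnd)]
    rw [List.map_reverse, ← hnvalsdef]
    rw [List.tail_reverse]
    rw [zip_rev_pred NC nvals.dropLast (by simp [hNClen, hnvlen]; omega)]
    rw [scat_reverse (NC.tail.zip nvals.dropLast) board
      (by
        intro pv hpv
        obtain ⟨a, v⟩ := pv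
        exact hNCok _ (List.mem_of_mem_tail (List.of_mem_zip hpv).1))
      (by
        rw [List.map_fst_zip (by simp [hNClen, hnvlen])]
        exact (List.tail_sublist NC).nodup hNCnd)]
    rw [pvWrite_eq (sameShape_scat _ board) hsok]
    rw [← hsnoc (NC.tail.zip nvals.dropLast) (pvNm board (pvCellOf start), nvals.getLast hnvne) board]
    rw [foldWrites_to_nat board _ board (sameShape_refl board) (by
      intro pv hpv
      obtain ⟨a, v⟩ := pv
      have hm := (List.of_mem_zip hpv).1
      rw [List.mem_append] at hm
      rcases hm with h | h
      · exact hCok _ (List.mem_of_mem_tail h)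
      · simp at h; rw [h]; exact hsok)]
    have hmapp : C.tail.map (pvNm board) ++ [pvNm board (pvCellOf start)]
        = (C.tail ++ [pvCellOf start]).map (pvNm board) := by
      rw [List.map_append]
      rfl
    have hzipmapB : (((C.tail ++ [pvCellOf start]).zip (nvals.dropLast ++ [nvals.getLast hnvne])).map
        (fun pv => (pvNm board pv.1, pv.2)))
        = (NC.tail ++ [pvNm board (pvCellOf start)]).zip (nvals.dropLast ++ [nvals.getLast hnvne]) := by
      conv_rhs => rw [hNCdef, ← List.map_tail, hmapp, List.zip_map_left]
      rfl
    rw [hzipmapB]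
    rw [List.zip_append (by simp [hNClen, hnvlen])]
    rfl

-- ===== VERDICT (by name: the statement is the Claim_ definition above) =====
theorem rotBoard_spec : Claim_equal_rotBoard := by
  intro board path start l d _ hpre
  unfold Spec_rotBoard
  obtain ⟨hs2, hsok, hrest⟩ := hpre
  rcases hrest with ⟨hl1, hl2, hpok, hnd⟩ | ⟨hl0, -, -, -⟩
  · exact main_equiv board path start l d hl1 hl2 hs2 hsok hpok hnd
  · exact small_equiv board path start l d hl0
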